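-- pv_equiv track=rewrite | github.com/cubetribe/Whisper-Transcription-Tool | src/whisper_transcription_tool/module2_extract/video_utils.py | get_video_segments
-- ===== SOURCE A (Python) =====
-- from typing import Dict, List, Optional, Tuple, Union
--
-- def get_video_segments(
--     video_info: Dict,
--     segment_duration: int = 600  # 10 minutes
-- ) -> List[Dict]:
--     """
--     Split a video into logical segments for processing.
--
--     Args:
--         video_info: Dictionary with video information
--         segment_duration: Duration of each segment in seconds
--
--     Returns:
--         List of segment dictionaries with start and end times
--     """
--     # Get video duration
--     duration = video_info.get("duration", 0)
--
--     # If duration is unknown or very short, return a single segment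
--     if duration <= 0 or duration <= segment_duration:
--         return [{"start": 0, "end": None, "index": 0}]
--
--     # Split into segments
--     segments = []
--     start_time = 0
--     index = 0
--
--     while start_time < duration:
--         end_time = min(start_time + segment_duration, duration)
--         segments.append({
--             "start": start_time,
--             "end": end_time,
--             "index": index
--         })
--         start_time = end_time
--         index += 1
--
--     return segments
-- ===== SOURCE B (Python) =====
-- def get_video_segments(video_info, segment_duration=600):
--     """Closed-form segmentation: ceil-divide the duration instead of
--     accumulating a running start_time."""
--     duration = video_info.get("duration", 0)
--     if duration <= 0 or duration <= segment_duration: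
--         return [{"start": 0, "end": None, "index": 0}]
--     n = -(-duration // segment_duration)  # ceil(duration / segment_duration)
--     return [{"start": i * segment_duration,
--              "end": min((i + 1) * segment_duration, duration),
--              "index": i}
--             for i in range(n)]
-- ===== Notes on version B (the rewrite author's own statement) =====
-- stated objective: alternative
-- what changed: Replaces the while-loop with a running start_time accumulator by a closed-form index formula: n = ceil(duration/segment_duration) segments, segment i = [i*sd, min((i+1)*sd, duration)).
import Mathlib
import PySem

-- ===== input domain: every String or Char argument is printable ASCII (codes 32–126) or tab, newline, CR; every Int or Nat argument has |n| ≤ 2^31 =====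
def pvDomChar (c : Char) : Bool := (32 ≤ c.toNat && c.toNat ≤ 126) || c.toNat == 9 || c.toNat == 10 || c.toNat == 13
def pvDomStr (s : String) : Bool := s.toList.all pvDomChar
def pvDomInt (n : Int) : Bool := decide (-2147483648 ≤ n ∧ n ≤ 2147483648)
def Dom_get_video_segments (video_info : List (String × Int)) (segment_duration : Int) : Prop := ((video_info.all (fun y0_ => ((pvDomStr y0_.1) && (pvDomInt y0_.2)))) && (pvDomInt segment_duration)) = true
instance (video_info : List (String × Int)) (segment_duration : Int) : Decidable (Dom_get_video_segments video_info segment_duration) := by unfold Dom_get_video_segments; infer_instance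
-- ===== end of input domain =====

-- B replaces A's running start_time while-loop by a closed-form index formula
-- (n = ceil(duration/segment_duration), segment i = [i*sd, min((i+1)*sd, dur))).


-- ===== PORT A =====
-- A's while-loop, totalized with fuel (duration.toNat iterations suffice since
-- each step advances start_time by at least 1 when segment_duration > 0).
def pvLoopA (dur sd : Int) : Nat → Int → Int → List (List (String × Option Int))
  | 0, _, _ => []
  | Nat.succ f, start, idx =>
    if start < dur then
      [("start", some start), ("end", some (min (start + sd) dur)), ("index", some idx)]
        :: pvLoopA dur sd f (min (start + sd) dur) (idx + 1)
    else []

def get_video_segments (video_info : List (String × Int)) (segment_duration : Int) : List (List (String × Option Int)) :=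
  let duration := (PySem.Dict.mk video_info).getD "duration" 0
  if duration ≤ 0 ∨ duration ≤ segment_duration then
    [[("start", some 0), ("end", none), ("index", some 0)]]
  else
    pvLoopA duration segment_duration duration.toNat 0 0

-- ===== PORT B =====
def get_video_segments_alt (video_info : List (String × Int)) (segment_duration : Int) : List (List (String × Option Int)) :=
  let duration := (PySem.Dict.mk video_info).getD "duration" 0
  if duration ≤ 0 ∨ duration ≤ segment_duration then
    [[("start", some 0), ("end", none), ("index", some 0)]]
  else
    let n := -(PySem.Int.floordiv (-duration) segment_duration)
    (PySem.List.pyRange 0 n 1).map (fun i =>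
      [("start", some (i * segment_duration)),
       ("end", some (min ((i + 1) * segment_duration) duration)),
       ("index", some i)])

-- ===== PRECONDITION & SPEC =====
-- Pre_ excludes segment_duration ≤ 0 together with a larger positive duration:
-- there A's while-loop never terminates (start_time never advances toward duration).
def Pre_get_video_segments (video_info : List (String × Int)) (segment_duration : Int) : Prop :=
  (PySem.Dict.mk video_info).getD "duration" 0 ≤ 0 ∨
  (PySem.Dict.mk video_info).getD "duration" 0 ≤ segment_duration ∨
  0 < segment_duration
instance (video_info : List (String × Int)) (segment_duration : Int) : Decidable (Pre_get_video_segments video_info segment_duration) := by unfold Pre_get_video_segments; infer_instance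

def pvWitness_get_video_segments : (List (String × Int)) × Int := ([("duration", 25)], 10)

def Spec_get_video_segments (video_info : List (String × Int)) (segment_duration : Int) (out : List (List (String × Option Int))) : Prop := out = get_video_segments_alt video_info segment_duration
instance (video_info : List (String × Int)) (segment_duration : Int) (out : List (List (String × Option Int))) : Decidable (Spec_get_video_segments video_info segment_duration out) := by unfold Spec_get_video_segments; infer_instance

-- ===== CLAIM (what is proved, stated in full; the proofs are below) =====
def Claim_equal_get_video_segments : Prop := ∀ (video_info : List (String × Int)) (segment_duration : Int), Dom_get_video_segments video_info segment_duration → Pre_get_video_segments video_info segment_duration → Spec_get_video_segments video_info segment_duration (get_video_segments video_info segment_duration)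

-- ===== LEMMAS AND PROOFS =====

theorem pvLoopA_of_ge (dur sd : Int) (fuel : Nat) (start idx : Int) (h : dur ≤ start) :
    pvLoopA dur sd fuel start idx = [] := by
  cases fuel with
  | zero => rfl
  | succ f => simp [pvLoopA, not_lt.mpr h]

theorem pvLoopA_eq_map (dur sd : Int) (hsd : 0 < sd) (n : Int)
    (hn : (n - 1) * sd < dur ∧ dur ≤ n * sd) :
    ∀ (fuel : Nat) (i : Int), (dur - i * sd).toNat ≤ fuel →
      pvLoopA dur sd fuel (i * sd) i =
        (PySem.List.pyRange i n 1).map (fun j =>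
          [("start", some (j * sd)), ("end", some (min ((j + 1) * sd) dur)), ("index", some j)]) := by
  intro fuel
  induction fuel with
  | zero =>
    intro i hf
    have hle : dur ≤ i * sd := by omega
    have : n ≤ i := by nlinarith [hn.1]
    rw [PySem.List.pyRange_one_eq_nil (by omega)]
    rfl
  | succ f ih =>
    intro i hf
    by_cases hi : i * sd < dur
    · have hin : i < n := by nlinarith [hn.2]
      have hadd : i * sd + sd = (i + 1) * sd := by ring
      rw [pvLoopA, if_pos hi, PySem.List.pyRange_one_cons hin, List.map_cons, hadd]
      by_cases h2 : (i + 1) * sd < dur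
      · rw [min_eq_left (le_of_lt h2)]
        exact congrArg _ (ih (i + 1) (by omega))
      · rw [min_eq_right (show dur ≤ (i + 1) * sd by omega), pvLoopA_of_ge dur sd f dur (i + 1) le_rfl]
        have hni : n ≤ i + 1 := by nlinarith [hn.1]
        rw [PySem.List.pyRange_one_eq_nil (by omega)]
        rfl
    · have : n ≤ i := by nlinarith [hn.1]
      rw [pvLoopA, if_neg hi, PySem.List.pyRange_one_eq_nil (by omega)]
      rfl

-- ===== VERDICT (by name: the statement is the Claim_ definition above) =====
theorem get_video_segments_spec : Claim_equal_get_video_segments := by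
  intro video_info sd _ hpre
  unfold Spec_get_video_segments get_video_segments get_video_segments_alt
  set dur := (PySem.Dict.mk video_info).getD "duration" 0 with hdur
  by_cases hg : dur ≤ 0 ∨ dur ≤ sd
  · simp only [if_pos hg]
  · simp only [if_neg hg]
    push Not at hg
    have hsd : 0 < sd := by
      unfold Pre_get_video_segments at hpre
      rw [← hdur] at hpre
      rcases hpre with h | h | h <;> omega
    set n := -(PySem.Int.floordiv (-dur) sd) with hn
    have hchar : (n - 1) * sd < dur ∧ dur ≤ n * sd :=
      (PySem.Int.neg_floordiv_neg_eq_iff_of_pos hsd).mp hn.symm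
    have := pvLoopA_eq_map dur sd hsd n hchar dur.toNat 0 (by simp)
    simpa using this
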